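-- pv_equiv track=rewrite | github.com/collegestu1231/DGMKT | mamba_ssm/models/Mamba/Test_file.py | find_closest_and_farthest
-- ===== SOURCE A (Python) =====
-- def edit_distance(list1, list2):
--     len1, len2 = len(list1), len(list2)
--     dp = [[0] * (len2 + 1) for _ in range(len1 + 1)]
--
--     # 初始化边界情况
--     for i in range(len1 + 1):
--         dp[i][0] = i
--     for j in range(len2 + 1):
--         dp[0][j] = j
--
--     # 填充dp数组
--     for i in range(1, len1 + 1):
--         for j in range(1, len2 + 1):
--             if list1[i - 1] == list2[j - 1]:
--                 dp[i][j] = dp[i - 1][j - 1]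
--             else:
--                 dp[i][j] = min(dp[i - 1][j], dp[i][j - 1], dp[i - 1][j - 1]) + 1
--
--     return dp[len1][len2]
--
-- def find_closest_and_farthest(lists):
--     # 选取第一个子列表作为基准列表
--     base_list = lists[0]
--
--     # 用于记录每个子列表与基准列表的编辑距离
--     distances = []
--
--     # 遍历从第二个子列表开始的每个子列表，计算与基准列表的编辑距离
--     for i in range(1, len(lists)):
--         distance = edit_distance(base_list, lists[i])  # 假设 edit_distance 已定义
--         distances.append((i, distance))  # 保存索引和距离
--
--     # 根据编辑距离对列表进行排序
--     distances.sort(key=lambda x: x[1])  # 从小到大排序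
--
--     # 分成两份：距离小的放入 closest_indices，距离大的放入 farthest_indices
--     midpoint = len(distances) // 2
--     closest_indices = [index for index, _ in distances[:midpoint]]
--     farthest_indices = [index for index, _ in distances[midpoint:]]
--
--     return closest_indices, farthest_indices
-- ===== SOURCE B (Python) =====
-- def edit_distance(list1, list2):
--     # top-down memoized recursion over prefixes instead of a bottom-up DP table
--     cache = {}
--     def rec(i, j):
--         if i == 0:
--             return j
--         if j == 0:
--             return i
--         if (i, j) in cache:
--             return cache[(i, j)]
--         if list1[i - 1] == list2[j - 1]:
--             res = rec(i - 1, j - 1)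
--         else:
--             res = 1 + min(rec(i - 1, j), rec(i, j - 1), rec(i - 1, j - 1))
--         cache[(i, j)] = res
--         return res
--     return rec(len(list1), len(list2))
--
-- def find_closest_and_farthest(lists):
--     base = lists[0]
--     distances = sorted(((i, edit_distance(base, sub)) for i, sub in enumerate(lists[1:], 1)),
--                        key=lambda t: t[1])
--     mid = len(distances) // 2
--     return [i for i, _ in distances[:mid]], [i for i, _ in distances[mid:]]
-- ===== Notes on version B (the rewrite author's own statement) =====
-- stated objective: alternative
-- what changed: edit_distance is rewritten from a bottom-up (len1+1)x(len2+1) DP table with boundary-initialisation loops and nested fill loops to a top-down memoized recursion rec(i,j) over prefixes caching results in a dict (no table is ever built; only reachable subproblems are computed, in recursion order); the outer function builds the (index, distance) list as a sorted comprehension over enumerate(lists[1:], 1) instead of an index loop appending and sorting in place.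
import Mathlib
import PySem

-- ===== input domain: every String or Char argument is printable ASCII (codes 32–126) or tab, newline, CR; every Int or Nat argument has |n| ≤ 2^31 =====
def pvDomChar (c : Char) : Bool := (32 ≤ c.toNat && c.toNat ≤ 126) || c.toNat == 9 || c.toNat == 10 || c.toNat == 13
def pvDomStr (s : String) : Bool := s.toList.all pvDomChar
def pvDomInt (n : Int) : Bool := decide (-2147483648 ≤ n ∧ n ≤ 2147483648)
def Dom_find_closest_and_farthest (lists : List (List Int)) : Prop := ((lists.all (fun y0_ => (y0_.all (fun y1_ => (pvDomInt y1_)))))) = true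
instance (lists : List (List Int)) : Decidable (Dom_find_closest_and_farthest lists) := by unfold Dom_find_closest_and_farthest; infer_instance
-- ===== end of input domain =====

-- B replaces A's bottom-up 2D DP table by a top-down memoized recursion over prefixes
-- (a dict cache threaded through the recursion), and builds the distance list as a sorted
-- comprehension over enumerate (objective: alternative decomposition, same asymptotic cost).
-- Return values agree on all non-empty inputs; A raises IndexError on [].

-- ===== PORT A =====
-- loop body of the dp-fill ('for j in range(1, len2+1): …'), named for reuse in the proofs
def aInner (list1 list2 : List Int) (i : Nat) (dp : List (List Int)) (j : Nat) : List (List Int) :=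
  let d : Int :=
    if list1.getD (i-1) 0 == list2.getD (j-1) 0 then (dp.getD (i-1) []).getD (j-1) 0
    else min (min ((dp.getD (i-1) []).getD j 0) ((dp.getD i []).getD (j-1) 0))
             ((dp.getD (i-1) []).getD (j-1) 0) + 1
  dp.set i ((dp.getD i []).set j d)

def edit_distance (list1 list2 : List Int) : Int :=
  let len1 := list1.length
  let len2 := list2.length
  let dp0 : List (List Int) := (List.range (len1+1)).map (fun _ => List.replicate (len2+1) (0:Int))
  let dp1 := (List.range (len1+1)).foldl (fun dp i => dp.set i ((dp.getD i []).set 0 (i:Int))) dp0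
  let dp2 := (List.range (len2+1)).foldl (fun dp j => dp.set 0 ((dp.getD 0 []).set j (j:Int))) dp1
  let dp3 := (List.range' 1 len1).foldl
      (fun dp i => (List.range' 1 len2).foldl (aInner list1 list2 i) dp) dp2
  (dp3.getD len1 []).getD len2 0

def find_closest_and_farthest (lists : List (List Int)) : List Int × List Int :=
  let base_list := lists.getD 0 []
  let distances : List (Int × Int) :=
    (PySem.List.pyRange 1 (lists.length : Int)).foldl
      (fun ds i => ds ++ [(i, edit_distance base_list (PySem.List.pyGetD lists i []))]) []
  let sortedd := PySem.List.sorted distances (fun x => x.2)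
  let midpoint := sortedd.length / 2
  ((sortedd.take midpoint).map (fun p => p.1), (sortedd.drop midpoint).map (fun p => p.1))

-- ===== PORT B =====
-- 'def rec(i, j): …' with its dict cache threaded through explicitly (Python mutates the
-- closed-over dict; here the cache is state passed in and returned, same lookups and inserts)
def edRec (l1 l2 : List Int) (i j : Nat) (cache : PySem.Dict (Nat × Nat) Int) :
    Int × PySem.Dict (Nat × Nat) Int :=
  if _hi : i = 0 then ((j : Int), cache)
  else if _hj : j = 0 then ((i : Int), cache)
  else
    match cache.get? (i, j) with
    | some v => (v, cache)
    | none =>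
      if l1.getD (i-1) 0 == l2.getD (j-1) 0 then
        let p := edRec l1 l2 (i-1) (j-1) cache
        (p.1, p.2.insert (i, j) p.1)
      else
        let p1 := edRec l1 l2 (i-1) j cache
        let p2 := edRec l1 l2 i (j-1) p1.2
        let p3 := edRec l1 l2 (i-1) (j-1) p2.2
        let r := 1 + min (min p1.1 p2.1) p3.1
        (r, p3.2.insert (i, j) r)
termination_by (i, j)
decreasing_by
  · exact Prod.Lex.left _ _ (by omega)
  · exact Prod.Lex.left _ _ (by omega)
  · exact Prod.Lex.right _ (by omega)
  · exact Prod.Lex.left _ _ (by omega)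

def edit_distance_alt (list1 list2 : List Int) : Int :=
  (edRec list1 list2 list1.length list2.length PySem.Dict.empty).1

def find_closest_and_farthest_alt (lists : List (List Int)) : List Int × List Int :=
  let base := lists.getD 0 []
  let distances := PySem.List.sorted
      ((PySem.List.enumerate (lists.drop 1) 1).map (fun p => (p.1, edit_distance_alt base p.2)))
      (fun t => t.2)
  let mid := distances.length / 2
  ((distances.take mid).map (fun p => p.1), (distances.drop mid).map (fun p => p.1))

-- ===== PRECONDITION & SPEC =====
-- Pre_ excludes only the empty list, on which A raises IndexError at lists[0] (B raises too).
def Pre_find_closest_and_farthest (lists : List (List Int)) : Prop := lists ≠ []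
instance (lists : List (List Int)) : Decidable (Pre_find_closest_and_farthest lists) := by
  unfold Pre_find_closest_and_farthest; infer_instance
def pvWitness_find_closest_and_farthest : List (List Int) := [[1, 2], [1, 3], [5]]
def Spec_find_closest_and_farthest (lists : List (List Int)) (out : List Int × List Int) : Prop :=
  out = find_closest_and_farthest_alt lists
instance (lists : List (List Int)) (out : List Int × List Int) :
    Decidable (Spec_find_closest_and_farthest lists out) := by
  unfold Spec_find_closest_and_farthest; infer_instance

-- ===== CLAIM (what is proved, stated in full; the proofs are below) =====
def Claim_equal_find_closest_and_farthest : Prop :=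
  ∀ (lists : List (List Int)), Dom_find_closest_and_farthest lists →
    Pre_find_closest_and_farthest lists →
      Spec_find_closest_and_farthest lists (find_closest_and_farthest lists)

-- ===== LEMMAS AND PROOFS =====

-- the edit-distance recurrence both programs compute
def ed (l1 l2 : List Int) : Nat → Nat → Int
  | 0, j => (j:Int)
  | (i+1), 0 => (i:Int)+1
  | (i+1), (j+1) =>
    if l1.getD i 0 == l2.getD j 0 then ed l1 l2 i j
    else 1 + min (min (ed l1 l2 i (j+1)) (ed l1 l2 (i+1) j)) (ed l1 l2 i j)
termination_by i j => (i, j)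

theorem ed_zero_left (l1 l2 : List Int) (j : Nat) : ed l1 l2 0 j = (j:Int) := by
  cases j <;> simp [ed]

theorem ed_zero_right (l1 l2 : List Int) (i : Nat) : ed l1 l2 i 0 = (i:Int) := by
  cases i <;> simp [ed]

-- ===== B-side: correctness of the memoized recursion =====

def CacheOK (l1 l2 : List Int) (c : PySem.Dict (Nat × Nat) Int) : Prop :=
  ∀ i j v, c.get? (i, j) = some v → v = ed l1 l2 i j

theorem cacheOK_insert (l1 l2 : List Int) (c : PySem.Dict (Nat × Nat) Int)
    (hc : CacheOK l1 l2 c) (a b : Nat) :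
    CacheOK l1 l2 (c.insert (a, b) (ed l1 l2 a b)) := by
  intro i j v h
  rw [PySem.Dict.get?_insert] at h
  by_cases he : (i, j) = (a, b)
  · rw [if_pos he] at h
    obtain ⟨h1, h2⟩ := Prod.mk.injEq .. ▸ he
    subst h1; subst h2
    exact (Option.some_inj.mp h).symm
  · rw [if_neg he] at h
    exact hc i j v h

theorem edRec_correct (l1 l2 : List Int) :
    ∀ n i j (c : PySem.Dict (Nat × Nat) Int), i + j ≤ n → CacheOK l1 l2 c →
      (edRec l1 l2 i j c).1 = ed l1 l2 i j ∧ CacheOK l1 l2 (edRec l1 l2 i j c).2 := by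
  intro n
  induction n with
  | zero =>
    intro i j c hn hc
    have hi : i = 0 := by omega
    subst hi
    rw [edRec, dif_pos rfl]
    exact ⟨(ed_zero_left l1 l2 j).symm, hc⟩
  | succ n ih =>
    intro i j c hn hc
    rw [edRec]
    by_cases hi : i = 0
    · subst hi
      rw [dif_pos rfl]
      exact ⟨(ed_zero_left l1 l2 j).symm, hc⟩
    rw [dif_neg hi]
    by_cases hj : j = 0
    · subst hj
      rw [dif_pos rfl]
      simp only
      refine ⟨?_, hc⟩
      rw [ed_zero_right]
    rw [dif_neg hj]
    obtain ⟨a, rfl⟩ := Nat.exists_eq_succ_of_ne_zero hi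
    obtain ⟨b, rfl⟩ := Nat.exists_eq_succ_of_ne_zero hj
    cases hget : c.get? (a+1, b+1) with
    | some v =>
      exact ⟨hc _ _ _ hget, hc⟩
    | none =>
      simp only [Nat.succ_sub_one]
      by_cases heq : l1.getD a 0 == l2.getD b 0
      · rw [if_pos heq]
        obtain ⟨h1, h2⟩ := ih a b c (by omega) hc
        refine ⟨?_, ?_⟩
        · simp only [h1]
          rw [ed, if_pos heq]
        · simp only [h1]
          have := cacheOK_insert l1 l2 _ h2 (a+1) (b+1)
          rw [show ed l1 l2 (a+1) (b+1) = ed l1 l2 a b from by rw [ed, if_pos heq]] at this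
          exact this
      · rw [if_neg heq]
        obtain ⟨h1, h2⟩ := ih a (b+1) c (by omega) hc
        obtain ⟨h3, h4⟩ := ih (a+1) b _ (by omega) h2
        obtain ⟨h5, h6⟩ := ih a b _ (by omega) h4
        refine ⟨?_, ?_⟩
        · simp only [h1, h3, h5]
          rw [ed, if_neg heq]
        · simp only [h1, h3, h5]
          have := cacheOK_insert l1 l2 _ h6 (a+1) (b+1)
          rw [show ed l1 l2 (a+1) (b+1)
              = 1 + min (min (ed l1 l2 a (b+1)) (ed l1 l2 (a+1) b)) (ed l1 l2 a b) from by
            rw [ed, if_neg heq]] at this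
          exact this

theorem alt_eq_ed (l1 l2 : List Int) :
    edit_distance_alt l1 l2 = ed l1 l2 l1.length l2.length := by
  have hempty : CacheOK l1 l2 PySem.Dict.empty := by
    intro i j v h
    rw [PySem.Dict.get?_empty] at h
    exact absurd h (by simp)
  exact (edRec_correct l1 l2 (l1.length + l2.length) l1.length l2.length
    PySem.Dict.empty le_rfl hempty).1

-- ===== A-side: the table fill computes ed =====

theorem getD_set' {α : Type} (l : List α) (i t : Nat) (v d : α) :
    (l.set i v).getD t d = if i = t ∧ i < l.length then v else l.getD t d := by
  simp only [List.getD_eq_getElem?_getD, List.getElem?_set]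
  by_cases h : i = t ∧ i < l.length
  · obtain ⟨rfl, h2⟩ := h
    simp [h2]
  · rw [if_neg h]
    by_cases he : i = t
    · subst he
      have : ¬ i < l.length := by tauto
      simp [this]
    · simp [he]

theorem getD_map_range' {α : Type} (f : Nat → α) (n t : Nat) (d : α) :
    ((List.range n).map f).getD t d = if t < n then f t else d := by
  simp only [List.getD_eq_getElem?_getD, List.getElem?_map]
  by_cases h : t < n
  · simp [h]
  · rw [List.getElem?_eq_none (by simpa using by omega), if_neg h]; rfl

theorem length_foldl_set {α β : Type} (r : List β) (h1 : β → Nat) (h2 : List α → β → α)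
    (l : List α) :
    (r.foldl (fun dp i => dp.set (h1 i) (h2 dp i)) l).length = l.length := by
  induction r generalizing l with
  | nil => rfl
  | cons a r ih => simp [List.foldl_cons, ih]

theorem foldl_set_zero {α : Type} (g : α → Nat → α) (d : α) :
    ∀ (r : List Nat) (l : List α), l ≠ [] →
      r.foldl (fun dp j => dp.set 0 (g (dp.getD 0 d) j)) l
        = l.set 0 (r.foldl g (l.getD 0 d)) := by
  intro r
  induction r with
  | nil =>
    intro l hl
    obtain ⟨a, l', rfl⟩ := List.exists_cons_of_ne_nil hl
    simp
  | cons b r ih =>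
    intro l hl
    obtain ⟨a, l', rfl⟩ := List.exists_cons_of_ne_nil hl
    rw [List.foldl_cons, List.foldl_cons]
    simp only [List.set_cons_zero, List.getD_cons_zero]
    rw [ih _ (by simp)]
    simp

def dval (dp : List (List Int)) (i j : Nat) : Int := (dp.getD i []).getD j 0

theorem foldl_set_range0 {α : Type} (f : Nat → α → α) (d : α) (n : Nat) (l : List α) (t : Nat) :
    (((List.range n).foldl (fun dp i => dp.set i (f i (dp.getD i d))) l).getD t d)
      = if t < n ∧ t < l.length then f t (l.getD t d) else l.getD t d := by
  have gen : ∀ (k s : Nat) (l : List α) (t : Nat),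
      (((List.range' s k).foldl (fun dp i => dp.set i (f i (dp.getD i d))) l).getD t d)
        = if s ≤ t ∧ t < s + k ∧ t < l.length then f t (l.getD t d) else l.getD t d := by
    intro k
    induction k with
    | zero => intro s l t; simp; omega
    | succ k ih =>
      intro s l t
      rw [List.range'_succ, List.foldl_cons, ih]
      rw [List.length_set, getD_set']
      by_cases h1 : s = t ∧ s < l.length
      · obtain ⟨rfl, h2⟩ := h1
        rw [if_neg (by omega), if_pos ⟨rfl, h2⟩, if_pos (by omega)]
      · rw [if_neg h1]
        by_cases h4 : s + 1 ≤ t ∧ t < s + 1 + k ∧ t < l.length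
        · rw [if_pos h4]
          try rw [if_neg h1]
          rw [if_pos (by omega)]
        · rw [if_neg h4, if_neg (by omega)]
  rw [List.range_eq_range', gen n 0 l t]
  by_cases h : t < n ∧ t < l.length
  · rw [if_pos ⟨by omega, by omega, h.2⟩, if_pos h]
  · rw [if_neg (by omega), if_neg h]

theorem innerA (l1 l2 : List Int) (i : Nat) (hi : i < l1.length) :
    ∀ c, c ≤ l2.length → ∀ dp : List (List Int),
      dp.length = l1.length+1 →
      (∀ t, t < l1.length+1 → (dp.getD t []).length = l2.length+1) →
      (∀ i' j, i' ≤ l1.length → j ≤ l2.length →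
         dval dp i' j = if i' ≤ i then ed l1 l2 i' j else if j = 0 then (i':Int) else 0) →
      (((List.range' 1 c).foldl (aInner l1 l2 (i+1)) dp).length = l1.length+1) ∧
      (∀ t, t < l1.length+1 →
        ((((List.range' 1 c).foldl (aInner l1 l2 (i+1)) dp)).getD t []).length = l2.length+1) ∧
      (∀ i' j, i' ≤ l1.length → j ≤ l2.length →
         dval ((List.range' 1 c).foldl (aInner l1 l2 (i+1)) dp) i' j
           = if i' ≤ i ∨ (i' = i+1 ∧ j ≤ c) then ed l1 l2 i' j else if j = 0 then (i':Int) else 0) := by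
  intro c
  induction c with
  | zero =>
    intro _ dp hlen hrow hval
    rw [List.range'_zero]
    refine ⟨by simpa using hlen, by simpa using hrow, ?_⟩
    intro i' j hi' hj
    simp only [List.foldl_nil]
    rw [hval i' j hi' hj]
    by_cases h1 : i' ≤ i
    · simp [h1]
    · by_cases h2 : i' = i + 1 ∧ j ≤ 0
      · obtain ⟨rfl, h2b⟩ := h2
        have hj0 : j = 0 := by omega
        subst hj0
        simp [h1, ed_zero_right]
      · have h3 : ¬ (i' ≤ i ∨ (i' = i + 1 ∧ j ≤ 0)) := by tauto
        rw [if_neg h1, if_neg h3]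
  | succ c ih =>
    intro hc dp hlen hrow hval
    rw [List.range'_1_concat, List.foldl_append, List.foldl_cons, List.foldl_nil]
    obtain ⟨Rlen, Rrow, Rval⟩ := ih (by omega) dp hlen hrow hval
    set R := (List.range' 1 c).foldl (aInner l1 l2 (i+1)) dp with hR
    have h1c : 1 + c - 1 = c := by omega
    have h1c' : 1 + c = c + 1 := by omega
    have hisub : i + 1 - 1 = i := by omega
    have hvald : (if l1.getD (i+1-1) 0 == l2.getD (1+c-1) 0
          then (R.getD (i+1-1) []).getD (1+c-1) 0
          else min (min ((R.getD (i+1-1) []).getD (1+c) 0) ((R.getD (i+1) []).getD (1+c-1) 0))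
                   ((R.getD (i+1-1) []).getD (1+c-1) 0) + 1) = ed l1 l2 (i+1) (c+1) := by
      rw [h1c, h1c', hisub]
      have e1 : (R.getD i []).getD c 0 = ed l1 l2 i c := by
        have hh := Rval i c (by omega) (by omega)
        unfold dval at hh
        rw [hh, if_pos (Or.inl le_rfl)]
      have e2 : (R.getD i []).getD (c+1) 0 = ed l1 l2 i (c+1) := by
        have hh := Rval i (c+1) (by omega) (by omega)
        unfold dval at hh
        rw [hh, if_pos (Or.inl le_rfl)]
      have e3 : (R.getD (i+1) []).getD c 0 = ed l1 l2 (i+1) c := by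
        have hh := Rval (i+1) c (by omega) (by omega)
        unfold dval at hh
        rw [hh, if_pos (Or.inr ⟨rfl, le_rfl⟩)]
      rw [e1, e2, e3, ed]
      by_cases hb : l1.getD i 0 == l2.getD c 0
      · rw [if_pos hb, if_pos hb]
      · rw [if_neg hb, if_neg hb]
        omega
    refine ⟨?_, ?_, ?_⟩
    · unfold aInner
      rw [List.length_set, Rlen]
    · intro t ht
      unfold aInner
      rw [getD_set']
      by_cases h : i + 1 = t ∧ i + 1 < R.length
      · rw [if_pos h, List.length_set]
        obtain ⟨rfl, _⟩ := h
        exact Rrow _ ht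
      · rw [if_neg h]
        exact Rrow _ ht
    · intro i' j hi' hj
      unfold aInner dval
      rw [getD_set']
      by_cases h : i + 1 = i'
      · subst h
        rw [if_pos ⟨rfl, by omega⟩, getD_set']
        have hrl : (R.getD (i+1) []).length = l2.length + 1 := Rrow _ (by omega)
        by_cases h2 : 1 + c = j
        · have hj' : j = c + 1 := by omega
          subst hj'
          rw [if_pos ⟨h2, by omega⟩, hvald, if_pos (Or.inr ⟨rfl, by omega⟩)]
        · rw [if_neg (fun hh => h2 hh.1)]
          have h3 := Rval (i+1) j (by omega) hj
          unfold dval at h3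
          rw [h3]
          by_cases h4 : j ≤ c
          · rw [if_pos (Or.inr ⟨rfl, h4⟩), if_pos (Or.inr ⟨rfl, by omega⟩)]
          · have h5 : ¬ (i + 1 ≤ i ∨ (i + 1 = i + 1 ∧ j ≤ c)) := by
              rintro (hh | ⟨_, hh⟩) <;> omega
            have h6 : ¬ (i + 1 ≤ i ∨ (i + 1 = i + 1 ∧ j ≤ c + 1)) := by
              rintro (hh | ⟨_, hh⟩) <;> omega
            rw [if_neg h5, if_neg h6]
      · rw [if_neg (fun hh => h hh.1)]
        have h3 := Rval i' j hi' hj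
        unfold dval at h3
        rw [h3]
        by_cases h4 : i' ≤ i
        · rw [if_pos (Or.inl h4), if_pos (Or.inl h4)]
        · have h5 : ¬ (i' ≤ i ∨ (i' = i + 1 ∧ j ≤ c)) := by
            rintro (hh | ⟨hh, _⟩)
            · omega
            · exact h hh.symm
          have h6 : ¬ (i' ≤ i ∨ (i' = i + 1 ∧ j ≤ c + 1)) := by
            rintro (hh | ⟨hh, _⟩)
            · omega
            · exact h hh.symm
          rw [if_neg h5, if_neg h6]

theorem outerA (l1 l2 : List Int) :
    ∀ m, m ≤ l1.length → ∀ dp : List (List Int),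
      dp.length = l1.length+1 →
      (∀ t, t < l1.length+1 → (dp.getD t []).length = l2.length+1) →
      (∀ i' j, i' ≤ l1.length → j ≤ l2.length →
         dval dp i' j = if i' ≤ 0 then ed l1 l2 i' j else if j = 0 then (i':Int) else 0) →
      (((List.range' 1 m).foldl
          (fun dp i => (List.range' 1 l2.length).foldl (aInner l1 l2 i) dp) dp).length = l1.length+1) ∧
      (∀ t, t < l1.length+1 →
        (((List.range' 1 m).foldl
          (fun dp i => (List.range' 1 l2.length).foldl (aInner l1 l2 i) dp) dp).getD t []).length = l2.length+1) ∧
      (∀ i' j, i' ≤ l1.length → j ≤ l2.length →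
         dval ((List.range' 1 m).foldl
            (fun dp i => (List.range' 1 l2.length).foldl (aInner l1 l2 i) dp) dp) i' j
           = if i' ≤ m then ed l1 l2 i' j else if j = 0 then (i':Int) else 0) := by
  intro m
  induction m with
  | zero =>
    intro _ dp hlen hrow hval
    rw [List.range'_zero]
    exact ⟨by simpa using hlen, by simpa using hrow, by simpa using hval⟩
  | succ m ih =>
    intro hm dp hlen hrow hval
    rw [List.range'_1_concat, List.foldl_append, List.foldl_cons, List.foldl_nil]
    obtain ⟨Rlen, Rrow, Rval⟩ := ih (by omega) dp hlen hrow hval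
    set R := (List.range' 1 m).foldl
        (fun dp i => (List.range' 1 l2.length).foldl (aInner l1 l2 i) dp) dp with hR
    have h1m : 1 + m = m + 1 := by omega
    rw [h1m]
    obtain ⟨Ilen, Irow, Ival⟩ := innerA l1 l2 m (by omega) l2.length le_rfl R Rlen Rrow Rval
    refine ⟨Ilen, Irow, ?_⟩
    intro i' j hi' hj
    rw [Ival i' j hi' hj]
    by_cases h : i' ≤ m + 1
    · have hor : i' ≤ m ∨ (i' = m + 1 ∧ j ≤ l2.length) := by
        by_cases hm2 : i' ≤ m
        · exact Or.inl hm2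
        · exact Or.inr ⟨by omega, hj⟩
      rw [if_pos hor, if_pos h]
    · have hor : ¬ (i' ≤ m ∨ (i' = m + 1 ∧ j ≤ l2.length)) := by
        rintro (hh | ⟨hh, _⟩) <;> omega
      rw [if_neg hor, if_neg h]

theorem a_eq_ed (l1 l2 : List Int) :
    edit_distance l1 l2 = ed l1 l2 l1.length l2.length := by
  set dp0 : List (List Int) :=
    (List.range (l1.length+1)).map (fun _ => List.replicate (l2.length+1) (0:Int)) with hdp0
  set dp1 : List (List Int) :=
    (List.range (l1.length+1)).foldl (fun dp i => dp.set i ((dp.getD i []).set 0 (i:Int))) dp0 with hdp1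
  set dp2 : List (List Int) :=
    (List.range (l2.length+1)).foldl (fun dp j => dp.set 0 ((dp.getD 0 []).set j (j:Int))) dp1 with hdp2
  have hdp0len : dp0.length = l1.length + 1 := by simp [hdp0]
  have hdp0get : ∀ t, dp0.getD t [] =
      if t < l1.length+1 then List.replicate (l2.length+1) (0:Int) else [] :=
    fun t => getD_map_range' _ _ _ _
  have hdp1len : dp1.length = l1.length + 1 := by
    rw [hdp1, length_foldl_set (List.range (l1.length+1)) (fun i => i)
      (fun dp i => (dp.getD i []).set 0 (i:Int)) dp0, hdp0len]
  have hdp1get : ∀ t, dp1.getD t [] =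
      if t < l1.length+1 ∧ t < dp0.length then (dp0.getD t []).set 0 (t:Int) else dp0.getD t [] :=
    fun t => foldl_set_range0 (fun i row => row.set 0 (i:Int)) [] (l1.length+1) dp0 t
  have hdp1ne : dp1 ≠ [] := by
    intro hcon
    rw [hcon] at hdp1len
    simp at hdp1len
  have hdp2eq : dp2 = dp1.set 0
      ((List.range (l2.length+1)).foldl (fun row j => row.set j (j:Int)) (dp1.getD 0 [])) :=
    foldl_set_zero (fun row j => row.set j (j:Int)) [] (List.range (l2.length+1)) dp1 hdp1ne
  have hrow0 : dp1.getD 0 [] = (List.replicate (l2.length+1) (0:Int)).set 0 ((0:Nat):Int) := by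
    rw [hdp1get 0, if_pos ⟨by omega, by omega⟩, hdp0get 0, if_pos (by omega)]
  have hrowfill_get : ∀ t, ((List.range (l2.length+1)).foldl
        (fun row j => row.set j (j:Int)) (dp1.getD 0 [])).getD t 0 =
      if t < l2.length+1 ∧ t < (dp1.getD 0 []).length then (t:Int) else (dp1.getD 0 []).getD t 0 :=
    fun t => foldl_set_range0 (fun j _ => (j:Int)) 0 (l2.length+1) (dp1.getD 0 []) t
  have hrow0len : (dp1.getD 0 []).length = l2.length + 1 := by
    rw [hrow0, List.length_set, List.length_replicate]
  have hrowfill_len : ((List.range (l2.length+1)).foldl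
        (fun row j => row.set j (j:Int)) (dp1.getD 0 [])).length = l2.length + 1 := by
    rw [length_foldl_set (List.range (l2.length+1)) (fun j => j)
      (fun row j => (j:Int)) (dp1.getD 0 []), hrow0len]
  have hlen2 : dp2.length = l1.length + 1 := by
    rw [hdp2eq, List.length_set, hdp1len]
  have hrow2 : ∀ t, t < l1.length+1 → (dp2.getD t []).length = l2.length + 1 := by
    intro t ht
    rw [hdp2eq, getD_set']
    by_cases h : (0:Nat) = t ∧ 0 < dp1.length
    · rw [if_pos h, hrowfill_len]
    · rw [if_neg h]
      have ht0 : t ≠ 0 := by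
        intro hcon
        exact h ⟨hcon.symm, by omega⟩
      rw [hdp1get t, if_pos ⟨ht, by omega⟩, List.length_set, hdp0get t, if_pos ht,
        List.length_replicate]
  have hbase : ∀ i' j, i' ≤ l1.length → j ≤ l2.length →
      dval dp2 i' j = if i' ≤ 0 then ed l1 l2 i' j else if j = 0 then (i':Int) else 0 := by
    intro i' j hi' hj
    unfold dval
    rw [hdp2eq, getD_set']
    by_cases h : (0:Nat) = i' ∧ 0 < dp1.length
    · obtain ⟨h0, _⟩ := h
      rw [if_pos ⟨h0, by omega⟩, hrowfill_get j, if_pos ⟨by omega, by omega⟩, ← h0,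
        if_pos le_rfl, ed_zero_left]
    · have hi0 : i' ≠ 0 := by
        intro hcon
        exact h ⟨hcon.symm, by omega⟩
      rw [if_neg h, hdp1get i', if_pos ⟨by omega, by omega⟩, hdp0get i', if_pos (by omega),
        getD_set']
      by_cases hj0 : (0:Nat) = j ∧ 0 < (List.replicate (l2.length+1) (0:Int)).length
      · rw [if_pos hj0, if_neg (by omega), if_pos hj0.1.symm]
      · have hj0' : j ≠ 0 := by
          intro hcon
          exact hj0 ⟨hcon.symm, by simp⟩
        have hz : (List.replicate (l2.length+1) (0:Int)).getD j 0 = 0 := by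
          simp only [List.getD_eq_getElem?_getD, List.getElem?_replicate]
          split_ifs <;> rfl
        rw [if_neg hj0, if_neg (by omega), if_neg hj0', hz]
  have h := (outerA l1 l2 l1.length le_rfl dp2 hlen2 hrow2 hbase).2.2 l1.length l2.length le_rfl le_rfl
  unfold dval at h
  rw [if_pos le_rfl] at h
  exact h

theorem ed_a_eq_alt (l1 l2 : List Int) : edit_distance l1 l2 = edit_distance_alt l1 l2 := by
  rw [a_eq_ed, alt_eq_ed]

theorem main_eq (lists : List (List Int)) (h : lists ≠ []) :
    find_closest_and_farthest lists = find_closest_and_farthest_alt lists := by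
  obtain ⟨b, rest, rfl⟩ := List.exists_cons_of_ne_nil h
  have henum : PySem.List.enumerate rest 1 =
      (PySem.List.pyRange 1 (((b :: rest).length : Nat) : Int)).map
        (fun j => (j, PySem.List.pyGetD (b :: rest) j ([] : List Int))) := by
    have h0 := PySem.List.enumerate_eq_map_pyRange (b :: rest) ([] : List Int)
    rw [PySem.List.enumerate_cons] at h0
    rw [show PySem.List.len (b :: rest) = (((b :: rest).length : Nat) : Int) from by
      simp [PySem.List.len]] at h0
    rw [PySem.List.pyRange_one_cons (by simp), List.map_cons] at h0
    injection h0 with h0a h0b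
  have hmapeq :
      (PySem.List.pyRange 1 (((b :: rest).length : Nat) : Int)).map
        (fun i => (i, edit_distance b (PySem.List.pyGetD (b :: rest) i [])))
      = (PySem.List.enumerate rest 1).map (fun p => (p.1, edit_distance_alt b p.2)) := by
    rw [henum, List.map_map]
    exact List.map_congr_left (fun i _ => by simp [Function.comp, ed_a_eq_alt])
  simp only [find_closest_and_farthest, find_closest_and_farthest_alt,
    List.getD_cons_zero, List.drop_succ_cons, List.drop_zero]
  rw [PySem.List.foldl_append_singleton_eq_map
      (fun i => ((i : Int), edit_distance b (PySem.List.pyGetD (b :: rest) i [])))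
      (PySem.List.pyRange 1 (((b :: rest).length : Nat) : Int)) []]
  rw [List.nil_append, hmapeq]

-- ===== VERDICT (by name: the statement is the Claim_ definition above) =====
theorem find_closest_and_farthest_spec : Claim_equal_find_closest_and_farthest := by
  intro lists _ hpre
  unfold Spec_find_closest_and_farthest
  exact main_eq lists hpre
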